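-- pv_equiv track=rewrite | github.com/sozgur/WB | prob-freq-count-pointers/average_pair.py | average_pair
-- ===== SOURCE A (Python) =====
-- def average_pair(nums, avg):
--     pair_of_total = avg * 2
--     check_hash = {}
--
--     for num in nums:
--         target = pair_of_total - num
--         if target in check_hash:
--             return True
--         check_hash[num] = True
--
--     return False
-- ===== SOURCE B (Python) =====
-- def average_pair(nums, avg):
--     total = avg * 2
--     s = sorted(nums)
--     lo, hi = 0, len(s) - 1
--     while lo < hi:
--         cur = s[lo] + s[hi]
--         if cur == total:
--             return True
--         if cur < total:
--             lo += 1
--         else: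
--             hi -= 1
--     return False
-- ===== Notes on version B (the rewrite author's own statement) =====
-- stated objective: alternative
-- what changed: Replaced the hash-dict single pass by sorting a copy of the list and scanning it with two converging pointers; no hash structure is built.
import Mathlib
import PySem

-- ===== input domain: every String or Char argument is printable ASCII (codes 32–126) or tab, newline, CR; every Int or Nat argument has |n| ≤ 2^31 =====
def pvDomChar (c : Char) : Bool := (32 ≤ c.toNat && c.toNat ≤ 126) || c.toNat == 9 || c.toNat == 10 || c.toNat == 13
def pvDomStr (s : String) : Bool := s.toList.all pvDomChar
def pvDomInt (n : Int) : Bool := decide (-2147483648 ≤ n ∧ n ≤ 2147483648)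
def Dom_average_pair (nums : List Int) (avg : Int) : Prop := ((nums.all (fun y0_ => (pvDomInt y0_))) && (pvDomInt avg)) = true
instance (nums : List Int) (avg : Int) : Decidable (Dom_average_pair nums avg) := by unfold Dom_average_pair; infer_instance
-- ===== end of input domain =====

-- B replaces A's seen-values hash dict by sorting a copy of the list and scanning it with two converging pointers.

-- ===== PORT A =====
-- the for-loop with early return, carrying check_hash
def pvGoA (total : Int) (d : PySem.Dict Int Bool) : List Int → Bool
  | [] => false
  | num :: rest =>
    let target := total - num
    if d.contains target then true else pvGoA total (d.insert num true) rest

def average_pair (nums : List Int) (avg : Int) : Bool :=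
  let pair_of_total := avg * 2
  pvGoA pair_of_total PySem.Dict.empty nums

-- ===== PORT B =====
-- the while-loop over the two indices lo, hi; s[lo]/s[hi] are always in range
-- (0 ≤ lo < hi ≤ len-1 whenever the loop body runs), so getD is exact here
def pvTwoPtr (s : List Int) (total : Int) (lo hi : Nat) : Bool :=
  if h : lo < hi then
    let cur := s.getD lo 0 + s.getD hi 0
    if cur == total then true
    else if cur < total then pvTwoPtr s total (lo + 1) hi
    else pvTwoPtr s total lo (hi - 1)
  else false
termination_by hi - lo
decreasing_by all_goals omega

def average_pair_alt (nums : List Int) (avg : Int) : Bool :=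
  let total := avg * 2
  let s := PySem.List.sorted nums (fun x => x) false
  pvTwoPtr s total 0 (s.length - 1)

-- ===== PRECONDITION & SPEC =====
def Spec_average_pair (nums : List Int) (avg : Int) (out : Bool) : Prop := out = average_pair_alt nums avg
instance (nums : List Int) (avg : Int) (out : Bool) : Decidable (Spec_average_pair nums avg out) := by unfold Spec_average_pair; infer_instance

-- ===== CLAIM (what is proved, stated in full; the proofs are below) =====
def Claim_equal_average_pair : Prop := ∀ (nums : List Int) (avg : Int), Dom_average_pair nums avg → Spec_average_pair nums avg (average_pair nums avg)

-- ===== LEMMAS AND PROOFS =====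

-- "some later element pairs with an earlier one": suffix-pair property
def pvSP (t : Int) : List Int → Prop
  | [] => False
  | x :: r => (t - x) ∈ r ∨ pvSP t r

-- order-free formulation
def pvQ (t : Int) (l : List Int) : Prop := ∃ x ∈ l, (t - x) ∈ l.erase x

lemma pvGoA_char (t : Int) (l : List Int) : ∀ d : PySem.Dict Int Bool,
    (pvGoA t d l = true) ↔ ((∃ m ∈ l, d.contains (t - m) = true) ∨ pvSP t l) := by
  induction l with
  | nil => intro d; simp [pvGoA, pvSP]
  | cons n rest ih =>
    intro d
    by_cases h : d.contains (t - n) = true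
    · constructor
      · intro _; exact Or.inl ⟨n, List.mem_cons_self, h⟩
      · intro _; simp only [pvGoA]; rw [if_pos h]
    · have hA : pvGoA t d (n :: rest) = pvGoA t (d.insert n true) rest := by
        simp only [pvGoA]; rw [if_neg h]
      have hins : ∀ m : Int, ((d.insert n true).contains (t - m) = true) ↔
          (t - m = n ∨ d.contains (t - m) = true) := by
        intro m
        rw [PySem.Dict.contains_insert]
        simp [beq_iff_eq]
      rw [hA, ih]
      constructor
      · rintro (⟨m, hm, hc⟩ | hg)
        · rcases (hins m).mp hc with he | hc'
          · have : t - n = m := by omega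
            right; exact Or.inl (this ▸ hm)
          · exact Or.inl ⟨m, List.mem_cons_of_mem _ hm, hc'⟩
        · right; exact Or.inr hg
      · rintro (⟨m, hm, hc⟩ | hg)
        · rcases List.mem_cons.mp hm with rfl | hm'
          · exact absurd hc h
          · exact Or.inl ⟨m, hm', (hins m).mpr (Or.inr hc)⟩
        · rcases hg with hmem | hg'
          · exact Or.inl ⟨t - n, hmem, (hins (t - n)).mpr (Or.inl (by omega))⟩
          · exact Or.inr hg'

lemma pvSP_iff_pvQ (t : Int) (l : List Int) : pvSP t l ↔ pvQ t l := by
  induction l with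
  | nil => simp [pvSP, pvQ]
  | cons x r ih =>
    constructor
    · rintro (hmem | hsp)
      · exact ⟨x, List.mem_cons_self, by simpa [List.erase_cons_head] using hmem⟩
      · obtain ⟨y, hy, hty⟩ := ih.mp hsp
        by_cases hyx : y = x
        · subst hyx
          exact ⟨y, List.mem_cons_self, by simpa [List.erase_cons_head] using List.mem_of_mem_erase hty⟩
        · refine ⟨y, List.mem_cons_of_mem _ hy, ?_⟩
          rw [List.erase_cons_tail (by simpa using (fun h => hyx h.symm))]
          exact List.mem_cons_of_mem _ hty
    · rintro ⟨y, hy, hty⟩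
      by_cases hyx : y = x
      · subst hyx
        rw [List.erase_cons_head] at hty
        exact Or.inl hty
      · rcases List.mem_cons.mp hy with rfl | hyr
        · exact absurd rfl hyx
        · rw [List.erase_cons_tail (by simpa using (fun h => hyx h.symm))] at hty
          rcases List.mem_cons.mp hty with hx | hty'
          · have : t - x = y := by omega
            exact Or.inl (this ▸ hyr)
          · exact Or.inr (ih.mpr ⟨y, hyr, hty'⟩)

lemma pvQ_perm {t : Int} {l l' : List Int} (hp : l.Perm l') : pvQ t l → pvQ t l' := by
  rintro ⟨x, hx, htx⟩
  exact ⟨x, hp.mem_iff.mp hx, (hp.erase x).mem_iff.mp htx⟩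

lemma pvSP_iff_exists (t : Int) (l : List Int) :
    pvSP t l ↔ ∃ i j : Nat, i < j ∧ j < l.length ∧ l.getD i 0 + l.getD j 0 = t := by
  induction l with
  | nil => simp [pvSP]
  | cons x r ih =>
    constructor
    · rintro (hmem | hsp)
      · obtain ⟨k, hk, hke⟩ := List.getElem_of_mem hmem
        refine ⟨0, k + 1, Nat.succ_pos k, by simpa using hk, ?_⟩
        have h0 : (x :: r).getD 0 0 = x := by simp
        have h1 : (x :: r).getD (k + 1) 0 = r[k] := by
          simp [List.getD, List.getElem?_eq_getElem hk]
        rw [h0, h1, hke]; omega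
      · obtain ⟨i, j, hij, hjl, he⟩ := ih.mp hsp
        refine ⟨i + 1, j + 1, by omega, by simpa using hjl, ?_⟩
        have h1 : (x :: r).getD (i + 1) 0 = r.getD i 0 := by simp [List.getD]
        have h2 : (x :: r).getD (j + 1) 0 = r.getD j 0 := by simp [List.getD]
        rw [h1, h2]; exact he
    · rintro ⟨i, j, hij, hjl, he⟩
      cases j with
      | zero => omega
      | succ j =>
        cases i with
        | zero =>
          left
          have hjr : j < r.length := by simpa using hjl
          have h0 : (x :: r).getD 0 0 = x := by simp
          have h1 : (x :: r).getD (j + 1) 0 = r[j] := by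
            simp [List.getD, List.getElem?_eq_getElem hjr]
          rw [h0, h1] at he
          have hv : t - x = r[j] := by omega
          rw [hv]; exact List.getElem_mem hjr
        | succ i =>
          right
          have h1 : (x :: r).getD (i + 1) 0 = r.getD i 0 := by simp [List.getD]
          have h2 : (x :: r).getD (j + 1) 0 = r.getD j 0 := by simp [List.getD]
          rw [h1, h2] at he
          exact ih.mpr ⟨i, j, by omega, by simpa using hjl, he⟩

lemma pvTwoPtr_char (s : List Int) (t : Int)
    (hs : s.Pairwise (fun a b => a ≤ b)) :
    ∀ lo hi : Nat, hi < s.length →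
    (pvTwoPtr s t lo hi = true ↔
      ∃ i j : Nat, lo ≤ i ∧ i < j ∧ j ≤ hi ∧ s.getD i 0 + s.getD j 0 = t) := by
  have mono : ∀ p q : Nat, p ≤ q → q < s.length → s.getD p 0 ≤ s.getD q 0 := by
    intro p q hpq hq
    rcases Nat.lt_or_ge p q with hlt | hge
    · have := List.pairwise_iff_getElem.mp hs p q (by omega) hq hlt
      rwa [List.getD_eq_getElem _ _ (by omega), List.getD_eq_getElem _ _ hq]
    · have : p = q := by omega
      simp [this]
  suffices H : ∀ n lo hi : Nat, hi - lo ≤ n → hi < s.length →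
      (pvTwoPtr s t lo hi = true ↔
        ∃ i j : Nat, lo ≤ i ∧ i < j ∧ j ≤ hi ∧ s.getD i 0 + s.getD j 0 = t) by
    intro lo hi hhi; exact H (hi - lo) lo hi le_rfl hhi
  intro n
  induction n with
  | zero =>
    intro lo hi hle hhi
    rw [pvTwoPtr, dif_neg (by omega : ¬ lo < hi)]
    constructor
    · intro h; exact absurd h (by simp)
    · rintro ⟨i, j, h1, h2, h3, _⟩; omega
  | succ n ih =>
    intro lo hi hle hhi
    rw [pvTwoPtr]
    by_cases hlh : lo < hi
    · rw [dif_pos hlh]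
      set cur := s.getD lo 0 + s.getD hi 0 with hcur
      by_cases hct : (cur == t) = true
      · rw [if_pos hct]
        exact iff_of_true rfl ⟨lo, hi, le_rfl, hlh, le_rfl, beq_iff_eq.mp hct⟩
      · rw [if_neg hct]
        have hne : cur ≠ t := by simpa using hct
        by_cases hlt : cur < t
        · rw [if_pos hlt]
          rw [ih (lo + 1) hi (by omega) hhi]
          constructor
          · rintro ⟨i, j, h1, h2, h3, h4⟩; exact ⟨i, j, by omega, h2, h3, h4⟩
          · rintro ⟨i, j, h1, h2, h3, h4⟩
            refine ⟨i, j, ?_, h2, h3, h4⟩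
            by_contra hcon
            have hie : i = lo := by omega
            have hmj : s.getD j 0 ≤ s.getD hi 0 := mono j hi h3 hhi
            rw [hie] at h4
            omega
        · rw [if_neg hlt]
          rw [ih lo (hi - 1) (by omega) (by omega)]
          constructor
          · rintro ⟨i, j, h1, h2, h3, h4⟩; exact ⟨i, j, h1, h2, by omega, h4⟩
          · rintro ⟨i, j, h1, h2, h3, h4⟩
            refine ⟨i, j, h1, h2, ?_, h4⟩
            by_contra hcon
            have hje : j = hi := by omega
            have hmi : s.getD lo 0 ≤ s.getD i 0 := mono lo i h1 (by omega)
            rw [hje] at h4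
            omega
    · rw [dif_neg hlh]
      constructor
      · intro h; exact absurd h (by simp)
      · rintro ⟨i, j, h1, h2, h3, _⟩; omega

-- ===== VERDICT (by name: the statement is the Claim_ definition above) =====
theorem average_pair_spec : Claim_equal_average_pair := by
  intro nums avg _
  unfold Spec_average_pair average_pair average_pair_alt
  rw [Bool.eq_iff_iff, pvGoA_char]
  simp only [PySem.Dict.contains_empty, Bool.false_eq_true, and_false, exists_false, false_or]
  set s := PySem.List.sorted nums (fun x => x) false with hsdef
  have hperm : s.Perm nums := PySem.List.sorted_perm nums (fun x => x) false
  have hpw : s.Pairwise (fun a b : Int => a ≤ b) := by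
    simpa using PySem.List.sorted_pairwise (xs := nums) (key := fun x => x)
  rcases Nat.eq_zero_or_pos s.length with hz | hpos
  · have hsnil : s = [] := List.length_eq_zero_iff.mp hz
    have hnnil : nums = [] := by
      have hl := hperm.length_eq
      rw [hsnil] at hl
      exact List.length_eq_zero_iff.mp hl.symm
    rw [hsnil, hnnil]
    simp [pvSP, pvTwoPtr]
  · rw [pvTwoPtr_char s _ hpw 0 (s.length - 1) (by omega)]
    have hBs : pvSP (avg * 2) s ↔
        ∃ i j : Nat, 0 ≤ i ∧ i < j ∧ j ≤ s.length - 1 ∧ s.getD i 0 + s.getD j 0 = avg * 2 := by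
      rw [pvSP_iff_exists]
      constructor
      · rintro ⟨i, j, h1, h2, h3⟩; exact ⟨i, j, by omega, h1, by omega, h3⟩
      · rintro ⟨i, j, _, h1, h2, h3⟩; exact ⟨i, j, h1, by omega, h3⟩
    rw [← hBs, pvSP_iff_pvQ (avg * 2) nums, pvSP_iff_pvQ (avg * 2) s]
    exact ⟨pvQ_perm hperm.symm, pvQ_perm hperm⟩
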